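-- pv_equiv track=rewrite | github.com/jaguilar992/exam_generator | test_generator.py | encode_answers_to_hex
-- ===== SOURCE A (Python) =====
-- def encode_answers_to_hex(correct_answers):
--     """
--     Codifica un array de respuestas correctas (0-3) en una cadena hexadecimal
--     Cada respuesta se codifica con 2 bits: 00=0, 01=1, 10=2, 11=3
--     4 respuestas por byte (8 bits)
--     """
--     hex_string = ""
--
--     # Procesar las respuestas en grupos de 4
--     for i in range(0, len(correct_answers), 4):
--         # Tomar hasta 4 respuestas del grupo actual
--         group = correct_answers[i:i+4]
--
--         # Rellenar con 0s si el grupo no tiene 4 elementos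
--         while len(group) < 4:
--             group.append(0)
--
--         # Convertir cada respuesta (0-3) a 2 bits y combinar en un byte
--         byte_value = 0
--         for j, answer in enumerate(group):
--             # Cada respuesta ocupa 2 bits, desplazada según su posición
--             byte_value |= (answer & 0x03) << (6 - j * 2)
--
--         # Convertir el byte a hexadecimal (2 dígitos)
--         hex_string += f"{byte_value:02X}"
--
--     return hex_string
-- ===== SOURCE B (Python) =====
-- def encode_answers_to_hex(correct_answers):
--     """
--     Codifica un array de respuestas correctas (0-3) en una cadena hexadecimal.
--     Same result as the byte-oriented version: pad once to a multiple of 4,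
--     then emit one hex digit (a nibble) per PAIR of answers in a single flat loop.
--     """
--     padded = correct_answers + [0] * (-len(correct_answers) % 4)
--     digits = []
--     i = 0
--     while i < len(padded):
--         digits.append("0123456789ABCDEF"[(padded[i] & 3) << 2 | (padded[i + 1] & 3)])
--         i += 2
--     return "".join(digits)
-- ===== Notes on version B (the rewrite author's own statement) =====
-- stated objective: alternative
-- what changed: Replaces the per-group slice/pad plus inner per-position shift-and-or loop and %02X byte formatting with a single up-front zero-pad to a multiple of 4 and one flat index loop that emits one hex digit per pair of answers via a direct nibble computation and table lookup.
import Mathlib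
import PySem

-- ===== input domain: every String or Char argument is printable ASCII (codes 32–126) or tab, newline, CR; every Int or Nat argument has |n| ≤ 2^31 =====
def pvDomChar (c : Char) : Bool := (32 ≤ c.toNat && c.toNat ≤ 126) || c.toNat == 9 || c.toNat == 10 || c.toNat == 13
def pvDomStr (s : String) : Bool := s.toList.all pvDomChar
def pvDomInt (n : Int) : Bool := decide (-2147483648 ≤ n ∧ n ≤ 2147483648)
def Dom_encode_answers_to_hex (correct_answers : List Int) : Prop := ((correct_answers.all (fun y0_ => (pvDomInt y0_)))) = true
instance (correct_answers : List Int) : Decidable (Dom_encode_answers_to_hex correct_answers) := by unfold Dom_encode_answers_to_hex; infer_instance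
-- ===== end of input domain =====

-- B replaces A's per-group slicing/padding + inner shift loop + %02X byte formatting by one
-- up-front zero-pad to a multiple of 4 and a flat index loop emitting one hex digit per PAIR
-- of answers (objective: alternative decomposition, same O(n) cost).

-- ===== PORT A =====
-- uppercase hex digit table ("0123456789ABCDEF")
def pvHexDigits : List Char :=
  ['0','1','2','3','4','5','6','7','8','9','A','B','C','D','E','F']

-- the 'while len(group) < 4: group.append(0)' loop
def pvPadGroup (g : List Int) : List Int :=
  if g.length < 4 then pvPadGroup (g ++ [0]) else g
termination_by 4 - g.length
decreasing_by simp; omega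

-- f"{b:02X}" — exact for 0 ≤ b < 256, which holds for every byte_value A builds
def pvHexByte (b : Int) : List Char :=
  [pvHexDigits.getD (b.toNat / 16) '0', pvHexDigits.getD (b.toNat % 16) '0']

def encode_answers_to_hex (correct_answers : List Int) : String :=
  let hex_string : List Char :=
    (PySem.List.pyRange 0 correct_answers.length 4).foldl (fun hex_string i =>
      let group := PySem.List.slice correct_answers (some i) (some (i + 4))
      let group := pvPadGroup group
      -- j from enumerate is 0..3 here, so the Nat shift (6 - j*2).toNat is Python's << exactly
      let byte_value := (PySem.List.enumerate group 0).foldl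
        (fun bv ja => PySem.Int.bor bv ((PySem.Int.band ja.2 3) <<< (6 - ja.1 * 2).toNat)) 0
      hex_string ++ pvHexByte byte_value) []
  String.ofList hex_string

-- ===== PORT B =====
-- correct_answers + [0] * (-len(correct_answers) % 4)   (the count is 0..3, so toNat is exact)
def pvPadded (xs : List Int) : List Int :=
  xs ++ List.replicate ((PySem.Int.mod (-(xs.length : Int)) 4).toNat) 0

-- the 'while i < len(padded):' loop: one nibble character per pair of answers
-- (padded[i] / padded[i+1] via pyGetD: both indices are in range on every call B makes,
-- since the padded length is a multiple of 4)
def pvPairLoop (padded : List Int) (i : Int) : List Char :=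
  if i < (padded.length : Int) then
    pvHexDigits.getD (PySem.Int.bor ((PySem.Int.band (PySem.List.pyGetD padded i 0) 3) <<< 2)
        (PySem.Int.band (PySem.List.pyGetD padded (i + 1) 0) 3)).toNat '0'
      :: pvPairLoop padded (i + 2)
  else []
termination_by ((padded.length : Int) - i).toNat
decreasing_by omega

def encode_answers_to_hex_alt (correct_answers : List Int) : String :=
  String.ofList (pvPairLoop (pvPadded correct_answers) 0)

-- ===== PRECONDITION & SPEC =====
def Spec_encode_answers_to_hex (correct_answers : List Int) (out : String) : Prop := out = encode_answers_to_hex_alt correct_answers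
instance (correct_answers : List Int) (out : String) : Decidable (Spec_encode_answers_to_hex correct_answers out) := by unfold Spec_encode_answers_to_hex; infer_instance

-- ===== CLAIM (what is proved, stated in full; the proofs are below) =====
def Claim_equal_encode_answers_to_hex : Prop := ∀ (correct_answers : List Int), Dom_encode_answers_to_hex correct_answers → Spec_encode_answers_to_hex correct_answers (encode_answers_to_hex correct_answers)

-- ===== LEMMAS AND PROOFS =====

-- proof-layer view of B's loop: one nibble per leading pair
def pvPairDigits : List Int → List Char
  | a :: b :: rest =>
      pvHexDigits.getD (PySem.Int.bor ((PySem.Int.band a 3) <<< 2) (PySem.Int.band b 3)).toNat '0'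
        :: pvPairDigits rest
  | _ => []

theorem pv_pairLoop_eq : ∀ (k : Nat) (padded : List Int) (i : Nat), padded.length - i = k →
    2 ∣ k → i ≤ padded.length → pvPairLoop padded (i : Int) = pvPairDigits (padded.drop i) := by
  intro k
  induction k using Nat.strong_induction_on with
  | _ k ih =>
    intro padded i hk hdvd hle
    unfold pvPairLoop
    by_cases h : (i : Int) < (padded.length : Int)
    · rw [if_pos h]
      have hi : i < padded.length := by exact_mod_cast h
      have h2 : i + 2 ≤ padded.length := by omega
      have hi1 : i + 1 < padded.length := by omega
      have hdrop : padded.drop i = padded[i] :: padded[i + 1] :: padded.drop (i + 2) := by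
        rw [List.drop_eq_getElem_cons hi, List.drop_eq_getElem_cons hi1]
      have g1 : PySem.List.pyGetD padded (i : Int) 0 = padded[i] := by
        rw [PySem.List.pyGetD_natCast, List.getD_eq_getElem _ _ hi]
      have g2 : PySem.List.pyGetD padded ((i : Int) + 1) 0 = padded[i + 1] := by
        rw [show ((i : Int) + 1) = (((i + 1 : Nat)) : Int) by push_cast; ring,
          PySem.List.pyGetD_natCast, List.getD_eq_getElem _ _ hi1]
      rw [hdrop, g1, g2, show ((i : Int) + 2) = (((i + 2 : Nat)) : Int) by push_cast; ring,
        ih (k - 2) (by omega) padded (i + 2) (by omega) (by omega) (by omega)]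
      simp [pvPairDigits]
    · rw [if_neg h]
      have hge : padded.length ≤ i := by exact_mod_cast not_lt.mp h
      rw [List.drop_eq_nil_of_le hge]
      rfl


-- A's inner shift-and-or loop over one (already padded) group
def pvByteOf (g : List Int) : Int :=
  (PySem.List.enumerate g 0).foldl
    (fun bv ja => PySem.Int.bor bv ((PySem.Int.band ja.2 3) <<< (6 - ja.1 * 2).toNat)) 0

theorem pv_band3_bounds (a : Int) : 0 ≤ PySem.Int.band a 3 ∧ PySem.Int.band a 3 < 4 := by
  unfold PySem.Int.band
  have h1 := Nat.and_le_right (n := a.toNat) (m := 3)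
  have h2 := Nat.and_le_left (n := 3) (m := (-a - 1).toNat)
  split_ifs <;> simp_all <;> omega

theorem pv_chunk (a b c d : Int) : pvHexByte (pvByteOf [a, b, c, d]) = pvPairDigits [a, b, c, d] := by
  obtain ⟨ha0, ha1⟩ := pv_band3_bounds a
  obtain ⟨hb0, hb1⟩ := pv_band3_bounds b
  obtain ⟨hc0, hc1⟩ := pv_band3_bounds c
  obtain ⟨hd0, hd1⟩ := pv_band3_bounds d
  simp only [pvByteOf, PySem.List.enumerate_cons, PySem.List.enumerate_nil, List.foldl_cons,
    List.foldl_nil, pvPairDigits]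
  generalize PySem.Int.band a 3 = x at *
  generalize PySem.Int.band b 3 = y at *
  generalize PySem.Int.band c 3 = z at *
  generalize PySem.Int.band d 3 = w at *
  interval_cases x <;> interval_cases y <;> interval_cases z <;> interval_cases w <;> decide

-- pvPadGroup in closed form (A only calls it on groups of length ≤ 4)
theorem pv_padGroup_eq : ∀ (k : Nat) (g : List Int), 4 - g.length = k → g.length ≤ 4 →
    pvPadGroup g = g ++ List.replicate (4 - g.length) 0 := by
  intro k
  induction k with
  | zero => intro g hk hle; unfold pvPadGroup; rw [if_neg (by omega)]; simp; omega
  | succ n ih =>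
      intro g hk hle
      unfold pvPadGroup
      rw [if_pos (by omega), ih (g ++ [0]) (by simp; omega) (by simp; omega)]
      have : 4 - g.length = (4 - (g ++ [0]).length) + 1 := by simp; omega
      simp [this, List.replicate_succ]

theorem pv_padded_split (xs : List Int) (h : xs ≠ []) :
    pvPadded xs = pvPadGroup (xs.take 4) ++ pvPadded (xs.drop 4) := by
  have hlen : 0 < xs.length := List.length_pos_iff.mpr h
  unfold pvPadded
  rw [pv_padGroup_eq (4 - (xs.take 4).length) _ rfl (by simp)]
  rw [PySem.Int.mod_eq_emod_of_pos (by omega), PySem.Int.mod_eq_emod_of_pos (by omega)]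
  by_cases h4 : 4 ≤ xs.length
  · have ht : (xs.take 4).length = 4 := by simp; omega
    have hcnt : ((-((xs.length:Int))) % 4).toNat = ((-(((xs.drop 4).length:Int))) % 4).toNat := by
      simp only [List.length_drop]
      rw [Nat.cast_sub h4]
      omega
    rw [ht, hcnt]
    simp only [Nat.sub_self, List.replicate_zero, List.append_nil]
    rw [← List.append_assoc, List.take_append_drop]
  · have hd : xs.drop 4 = [] := List.drop_eq_nil_of_le (by omega)
    have ht : xs.take 4 = xs := List.take_of_length_le (by omega)
    rw [hd, ht]
    have hcnt : ((-((xs.length:Int))) % 4).toNat = 4 - xs.length := by omega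
    simp [hcnt]


theorem pv_pyRange4_cons (n : Nat) (h : 0 < n) :
    PySem.List.pyRange 0 (n : Int) 4 = 0 :: (PySem.List.pyRange 0 ((n - 4 : Nat) : Int) 4).map (· + 4) := by
  rw [PySem.List.pyRange_of_pos _ _ (by omega : (0:Int) < 4),
      PySem.List.pyRange_of_pos _ _ (by omega : (0:Int) < 4)]
  have hc : (if (0:Int) < (n : Int) then (((n:Int) - 0 + 4 - 1) / 4).toNat else 0)
      = (if (0:Int) < ((n - 4 : Nat) : Int) then ((((n - 4 : Nat):Int) - 0 + 4 - 1) / 4).toNat else 0) + 1 := by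
    split_ifs <;> omega
  rw [hc, List.range_succ_eq_map]
  simp only [List.map_cons, List.map_map]
  refine congrArg₂ _ (by norm_num) (List.map_congr_left fun k _ => ?_)
  simp [Function.comp]
  ring



theorem pv_core_aux : ∀ (n : Nat) (xs : List Int), xs.length = n →
    (PySem.List.pyRange 0 (xs.length : Int) 4).flatMap
      (fun i => pvHexByte (pvByteOf (pvPadGroup (PySem.List.slice xs (some i) (some (i + 4))))))
      = pvPairDigits (pvPadded xs) := by
  intro n
  induction n using Nat.strong_induction_on with
  | _ n ih =>
    intro xs hn
    match xs with
    | [] => simp [PySem.List.pyRange, pvPadded, pvPairDigits, PySem.Int.mod]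
    | a :: xs' =>
      rw [show ((a :: xs').length : Int) = (((a :: xs').length : Nat) : Int) from rfl]
      rw [pv_pyRange4_cons _ (by simp)]
      rw [List.flatMap_cons, List.flatMap_map]
      -- first chunk
      have hlen4 : (pvPadGroup ((a :: xs').take 4)).length = 4 := by
        rw [pv_padGroup_eq (4 - ((a :: xs').take 4).length) _ rfl (by simp)]
        simp
      obtain ⟨p, q, r, s, hpq⟩ := List.length_eq_four.mp hlen4
      have hslice : PySem.List.slice (a :: xs') (some 0) (some (0 + 4)) = (a :: xs').take 4 := by
        rw [PySem.List.slice_zero_start, show ((0:Int) + 4) = ((4:Nat):Int) by norm_num,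
          PySem.List.slice_to_natCast]
      -- congruence on the tail: shift the start index into a drop
      have htail : ∀ i ∈ PySem.List.pyRange 0 (((a :: xs').length - 4 : Nat) : Int) 4,
          pvHexByte (pvByteOf (pvPadGroup (PySem.List.slice (a :: xs') (some (i + 4)) (some (i + 4 + 4)))))
          = pvHexByte (pvByteOf (pvPadGroup (PySem.List.slice ((a :: xs').drop 4) (some i) (some (i + 4))))) := by
        intro i hi
        have hi0 : 0 ≤ i := ((PySem.List.mem_pyRange_iff_of_pos (by omega) i).mp hi).1
        have hs : PySem.List.slice (a :: xs') (some (i + 4)) (some (i + 4 + 4))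
            = PySem.List.slice ((a :: xs').drop 4) (some i) (some (i + 4)) := by
          rw [PySem.List.slice_toNat _ (by omega) (by omega), PySem.List.slice_toNat _ (by omega) (by omega)]
          rw [List.drop_drop, Nat.add_comm 4 i.toNat]
          have h1 : (i + 4).toNat = i.toNat + 4 := by omega
          have h2 : (i + 4 + 4).toNat = (i + 4).toNat + 4 := by omega
          rw [h1, h2]
          congr 1
          omega
        rw [hs]
      rw [List.flatMap_congr htail]
      rw [hslice, hpq, pv_chunk]
      rw [pv_padded_split _ (by simp), hpq]
      have hsplit : pvPairDigits ([p, q, r, s] ++ pvPadded ((a :: xs').drop 4))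
          = pvPairDigits [p, q, r, s] ++ pvPairDigits (pvPadded ((a :: xs').drop 4)) := by
        simp [pvPairDigits]
      rw [hsplit]
      congr 1
      have hnpos : 0 < n := by rw [← hn]; simp
      have hih := ih (n - 4) (by omega) ((a :: xs').drop 4) (by simp [← hn])
      rw [List.length_drop] at hih
      exact hih

theorem pv_core (xs : List Int) :
    (PySem.List.pyRange 0 (xs.length : Int) 4).flatMap
      (fun i => pvHexByte (pvByteOf (pvPadGroup (PySem.List.slice xs (some i) (some (i + 4))))))
      = pvPairDigits (pvPadded xs) :=
  pv_core_aux xs.length xs rfl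

theorem pv_main (xs : List Int) : encode_answers_to_hex xs = encode_answers_to_hex_alt xs := by
  show String.ofList ((PySem.List.pyRange 0 (xs.length : Int) 4).foldl
      (fun h i => h ++ pvHexByte (pvByteOf (pvPadGroup (PySem.List.slice xs (some i) (some (i + 4)))))) [])
    = String.ofList (pvPairLoop (pvPadded xs) 0)
  rw [PySem.List.foldl_append_eq_flatMap
    (g := fun i => pvHexByte (pvByteOf (pvPadGroup (PySem.List.slice xs (some i) (some (i + 4))))))]
  rw [List.nil_append, pv_core]
  have hdvd : 2 ∣ (pvPadded xs).length := by
    unfold pvPadded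
    rw [PySem.Int.mod_eq_emod_of_pos (by omega)]
    simp only [List.length_append, List.length_replicate]
    omega
  rw [show ((0:Int)) = ((0:Nat):Int) from rfl,
    pv_pairLoop_eq ((pvPadded xs).length) _ 0 (by omega) (by simpa using hdvd) (by omega)]
  rw [List.drop_zero]

-- ===== VERDICT (by name: the statement is the Claim_ definition above) =====
theorem encode_answers_to_hex_spec : Claim_equal_encode_answers_to_hex := by
  intro xs _
  unfold Spec_encode_answers_to_hex
  exact pv_main xs
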